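-- pv_equiv track=rewrite | github.com/huan186/LeetCode | 1944-number-of-visible-people-in-a-queue/1944-number-of-visible-people-in-a-queue.py | canSeePersonsCount
-- ===== SOURCE A (Python) =====
-- from typing import List
--
-- def canSeePersonsCount(heights: List[int]) -> List[int]:
--     n = len(heights)
--     res = [0] * n
--     st = []
--     for i in range(n - 1, -1, -1):
--         cnt = 0
--         while st and st[-1] <= heights[i]:
--             cnt += 1
--             st.pop()
--         if st:
--             cnt += 1
--         res[i] = cnt
--         st.append(heights[i])
--     return res
-- ===== SOURCE B (Python) =====
-- from typing import List
--
-- def canSeePersonsCount(heights: List[int]) -> List[int]: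
--     # Left-to-right sweep: credit a person when someone they can see arrives,
--     # instead of counting pops while scanning right-to-left.
--     n = len(heights)
--     res = [0] * n
--     st = []  # stack of (index, height), heights non-increasing bottom -> top
--     for i, h in enumerate(heights):
--         while st and st[-1][1] < h:
--             res[st.pop()[0]] += 1      # the popped person sees i
--         if st:
--             res[st[-1][0]] += 1        # the taller blocker also sees i
--         st.append((i, h))
--     return res
-- ===== Notes on version B (the rewrite author's own statement) =====
-- stated objective: alternative
-- what changed: Replaces A's right-to-left scan (which counts pops of a height stack plus a blocker for the current person) with a left-to-right sweep over a monotonic stack of (index, height) pairs that credits res[j] at the moment person j's visible newcomer arrives (pop with strict '<', then credit the surviving top).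
import Mathlib
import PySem

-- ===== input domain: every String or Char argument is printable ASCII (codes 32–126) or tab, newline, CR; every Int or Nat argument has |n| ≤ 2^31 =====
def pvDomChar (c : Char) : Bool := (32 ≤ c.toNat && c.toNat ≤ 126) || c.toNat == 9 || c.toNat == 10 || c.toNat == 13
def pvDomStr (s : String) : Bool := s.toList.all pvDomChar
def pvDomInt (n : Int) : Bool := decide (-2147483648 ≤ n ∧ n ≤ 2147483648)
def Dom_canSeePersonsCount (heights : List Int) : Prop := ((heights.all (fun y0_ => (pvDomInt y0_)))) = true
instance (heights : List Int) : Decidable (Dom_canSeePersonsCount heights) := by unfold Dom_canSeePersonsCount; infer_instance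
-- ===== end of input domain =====

-- B changes the sweep direction and the crediting scheme (left-to-right, credit the seer when the
-- seen person arrives) rather than A's right-to-left pop counting; same O(n) cost ("alternative").

-- ===== PORT A =====
-- A's inner `while st and st[-1] <= heights[i]: cnt += 1; st.pop()` (stack top at head)
def popA (h : Int) : List Int → Int × List Int
  | [] => (0, [])
  | x :: r => if x ≤ h then let p := popA h r; (p.1 + 1, p.2) else (0, x :: r)

-- A's loop `for i in range(n-1, -1, -1)` as the obvious structural recursion from the right:
-- process the tail (the indices to the right) first, then the head; state = (res, st).
def goA : List Int → List Int × List Int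
  | [] => ([], [])
  | h :: t =>
    let p := goA t
    let q := popA h p.2
    let cnt := q.1 + (if q.2 = [] then 0 else 1)   -- `if st: cnt += 1`
    (cnt :: p.1, h :: q.2)                          -- `res[i] = cnt; st.append(heights[i])`

def canSeePersonsCount (heights : List Int) : List Int := (goA heights).1

-- ===== PORT B =====
-- `res[j] += 1` for a position j known to be a valid index
def incAt : List Int → Nat → List Int
  | [], _ => []
  | x :: t, 0 => (x + 1) :: t
  | x :: t, n + 1 => x :: incAt t n

-- `enumerate(heights)` (indices are the nonnegative positions 0,1,2,…)
def enumFrom (k : Nat) : List Int → List (Nat × Int)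
  | [] => []
  | x :: t => (k, x) :: enumFrom (k + 1) t

-- B's inner `while st and st[-1][1] < h: res[st.pop()[0]] += 1` (stack top at head)
def popB (v : Int) : List Int → List (Nat × Int) → List Int × List (Nat × Int)
  | res, [] => (res, [])
  | res, (j, g) :: r => if g < v then popB v (incAt res j) r else (res, (j, g) :: r)

-- one iteration of B's `for i, h in enumerate(heights)` loop
def stepB (acc : List Int × List (Nat × Int)) (ih : Nat × Int) : List Int × List (Nat × Int) :=
  let p := popB ih.2 acc.1 acc.2
  let res2 := match p.2 with
    | [] => p.1
    | (j, _) :: _ => incAt p.1 j                    -- `if st: res[st[-1][0]] += 1`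
  (res2, ih :: p.2)                                 -- `st.append((i, h))`

def canSeePersonsCount_alt (heights : List Int) : List Int :=
  (List.foldl stepB (List.replicate heights.length 0, []) (enumFrom 0 heights)).1

-- ===== PRECONDITION & SPEC =====
def Spec_canSeePersonsCount (heights : List Int) (out : List Int) : Prop := out = canSeePersonsCount_alt heights
instance (heights : List Int) (out : List Int) : Decidable (Spec_canSeePersonsCount heights out) := by unfold Spec_canSeePersonsCount; infer_instance

-- ===== CLAIM (what is proved, stated in full; the proofs are below) =====
def Claim_equal_canSeePersonsCount : Prop := ∀ (heights : List Int), Dom_canSeePersonsCount heights → Spec_canSeePersonsCount heights (canSeePersonsCount heights)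

-- ===== LEMMAS AND PROOFS =====

-- the strictly increasing run of suffix maxima: exactly A's stack after processing the list
def incRun : List Int → List Int
  | [] => []
  | v :: t => v :: (incRun t).filter (fun x => decide (v < x))

-- what one person counts, given the increasing run to their right
def fA (h : Int) : List Int → Int
  | [] => 0
  | x :: r => if x ≤ h then 1 + fA h r else 1

-- the common reference result
def spec : List Int → List Int
  | [] => []
  | h :: t => fA h (incRun t) :: spec t

-- `res[j] += d`
def addAt : List Int → Nat → Int → List Int
  | [], _, _ => []
  | x :: t, 0, d => (x + d) :: t
  | x :: t, n + 1, d => x :: addAt t n d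

-- credits the stack elements (top first) will still receive from run R
def stCredits (res : List Int) : List (Nat × Int) → List Int → List Int
  | [], _ => res
  | (j, g) :: rest, R => stCredits (addAt res j (fA g R)) rest (R.filter (fun x => decide (g < x)))

-- writes spec's values for the suffix s at positions k, k+1, …
def specSuffix (res : List Int) (k : Nat) : List Int → List Int
  | [] => res
  | v :: t => specSuffix (addAt res k (fA v (incRun t))) (k + 1) t

theorem incAt_eq_addAt (res : List Int) (j : Nat) : incAt res j = addAt res j 1 := by
  induction res generalizing j with
  | nil => rfl
  | cons x t ih => cases j with
    | zero => rfl
    | succ n => simp [incAt, addAt, ih]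

theorem addAt_zero (res : List Int) (j : Nat) : addAt res j 0 = res := by
  induction res generalizing j with
  | nil => rfl
  | cons x t ih => cases j with
    | zero => simp [addAt]
    | succ n => simp [addAt, ih]

theorem addAt_addAt_same (res : List Int) (j : Nat) (a b : Int) :
    addAt (addAt res j a) j b = addAt res j (a + b) := by
  induction res generalizing j with
  | nil => rfl
  | cons x t ih => cases j with
    | zero => simp [addAt]; ring
    | succ n => simp [addAt, ih]

theorem addAt_comm (res : List Int) (i j : Nat) (a b : Int) :
    addAt (addAt res i a) j b = addAt (addAt res j b) i a := by
  induction res generalizing i j with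
  | nil => rfl
  | cons x t ih =>
    cases i with
    | zero => cases j with
      | zero => simp [addAt]; ring
      | succ m => simp [addAt]
    | succ n => cases j with
      | zero => simp [addAt]
      | succ m => simp [addAt, ih]

theorem fA_nil (h : Int) : fA h [] = 0 := rfl

theorem stCredits_nil (st : List (Nat × Int)) (res : List Int) :
    stCredits res st [] = res := by
  induction st generalizing res with
  | nil => rfl
  | cons p rest ih =>
    obtain ⟨j, g⟩ := p
    simp [stCredits, fA_nil, addAt_zero, ih]

theorem stCredits_addAt (st : List (Nat × Int)) (res : List Int) (R : List Int)
    (j : Nat) (d : Int) :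
    stCredits (addAt res j d) st R = addAt (stCredits res st R) j d := by
  induction st generalizing res R with
  | nil => rfl
  | cons p rest ih =>
    obtain ⟨i, g⟩ := p
    simp [stCredits, addAt_comm res j i, ih]

-- elements of incRun are pairwise strictly increasing
theorem incRun_pairwise (s : List Int) : (incRun s).Pairwise (· < ·) := by
  induction s with
  | nil => exact List.Pairwise.nil
  | cons v t ih =>
    refine List.pairwise_cons.mpr ⟨?_, ih.filter _⟩
    intro x hx
    have := List.of_mem_filter hx
    simpa using this

-- A's pop on a sorted stack: the remaining stack is the filter
theorem popA_snd (h : Int) (st : List Int) (hst : st.Pairwise (· < ·)) :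
    (popA h st).2 = st.filter (fun x => decide (h < x)) := by
  induction st with
  | nil => rfl
  | cons x r ih =>
    rcases List.pairwise_cons.mp hst with ⟨hx, hr⟩
    by_cases hxh : x ≤ h
    · simp [popA, hxh, ih hr]
    · have hfx : decide (h < x) = true := by simp; omega
      have hall : r.filter (fun y => decide (h < y)) = r :=
        List.filter_eq_self.mpr (fun y hy => by have := hx y hy; simp; omega)
      simp [popA, hxh, hfx, hall]

-- A's pop count plus the blocker equals fA, on a sorted stack
theorem popA_cnt (h : Int) (st : List Int) (hst : st.Pairwise (· < ·)) :
    (popA h st).1 + (if (popA h st).2 = [] then 0 else 1) = fA h st := by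
  induction st with
  | nil => rfl
  | cons x r ih =>
    rcases List.pairwise_cons.mp hst with ⟨hx, hr⟩
    by_cases hxh : x ≤ h
    · have := ih hr
      simp only [popA, hxh, if_true, fA]
      omega
    · simp [popA, hxh, fA]

-- A's stack after processing s is incRun s
theorem goA_snd (s : List Int) : (goA s).2 = incRun s := by
  induction s with
  | nil => rfl
  | cons h t ih =>
    simp only [goA, incRun, ← ih]
    rw [popA_snd h (goA t).2 (by rw [ih]; exact incRun_pairwise t)]

-- A's result is spec
theorem goA_fst (s : List Int) : (goA s).1 = spec s := by
  induction s with
  | nil => rfl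
  | cons h t ih =>
    simp only [goA, spec, ← ih]
    rw [show (goA t).2 = incRun t from goA_snd t,
        popA_cnt h (incRun t) (incRun_pairwise t)]

-- key pop lemma for B: popping + crediting the new top rewrites the credit fold
theorem pop_credits (st : List (Nat × Int)) (res : List Int) (v : Int) (F : List Int)
    (hF : ∀ x ∈ F, v < x) :
    stCredits (match (popB v res st).2 with
               | [] => (popB v res st).1
               | (j, _) :: _ => incAt (popB v res st).1 j)
              (popB v res st).2 F
    = stCredits res st (v :: F) := by
  induction st generalizing res with
  | nil => rfl
  | cons p rest ih =>
    obtain ⟨j, g⟩ := p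
    by_cases hgv : g < v
    · have hpop : popB v res ((j, g) :: rest) = popB v (incAt res j) rest := by
        simp [popB, hgv]
      rw [hpop, ih (incAt res j)]
      have hfa : fA g (v :: F) = 1 := by simp [fA]; omega
      have hfilter : (v :: F).filter (fun x => decide (g < x)) = v :: F := by
        refine List.filter_eq_self.mpr (fun y hy => ?_)
        rcases List.mem_cons.mp hy with h1 | h1
        · subst h1; simp; omega
        · have := hF y h1; simp; omega
      simp [stCredits, hfa, hfilter, incAt_eq_addAt]
    · have hpop : popB v res ((j, g) :: rest) = (res, (j, g) :: rest) := by
        simp [popB, hgv]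
      rw [hpop]
      have hfa : fA g (v :: F) = 1 + fA g F := by simp [fA]; omega
      have hfilter : (v :: F).filter (fun x => decide (g < x))
          = F.filter (fun x => decide (g < x)) := by
        have hd : decide (g < v) = false := by simp; omega
        simp [hd]
      simp only [stCredits, hfa, hfilter, incAt_eq_addAt, addAt_addAt_same]

theorem mem_filter_lt (v : Int) (R : List Int) :
    ∀ x ∈ R.filter (fun x => decide (v < x)), v < x := by
  intro x hx
  have := List.of_mem_filter hx
  simpa using this

-- B's fold over the suffix, for any starting res and stack
theorem mainB (s : List Int) : ∀ (res : List Int) (st : List (Nat × Int)) (k : Nat),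
    (List.foldl stepB (res, st) (enumFrom k s)).1
      = specSuffix (stCredits res st (incRun s)) k s := by
  induction s with
  | nil => intro res st k; simp [enumFrom, stCredits_nil, incRun, specSuffix]
  | cons v s' ih =>
    intro res st k
    simp only [enumFrom, List.foldl_cons]
    rw [show stepB (res, st) (k, v)
        = ((match (popB v res st).2 with
            | [] => (popB v res st).1
            | (j, _) :: _ => incAt (popB v res st).1 j),
           (k, v) :: (popB v res st).2) from rfl]
    rw [ih]
    simp only [stCredits, specSuffix]
    rw [stCredits_addAt]
    rw [pop_credits st res v ((incRun s').filter (fun x => decide (v < x)))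
        (mem_filter_lt v (incRun s'))]
    rw [show (v :: (incRun s').filter (fun x => decide (v < x))) = incRun (v :: s') from rfl]

-- writing spec's values into a zero block
theorem specSuffix_zeros (s : List Int) : ∀ (r : List Int),
    specSuffix (r ++ List.replicate s.length 0) r.length s = r ++ spec s := by
  induction s with
  | nil => intro r; simp [specSuffix, spec]
  | cons v t ih =>
    intro r
    have haddAt : ∀ (rest : List Int) (c : Int),
        addAt (r ++ (0 : Int) :: rest) r.length c = (r ++ [c]) ++ rest := by
      intro rest c
      induction r with
      | nil => simp [addAt]
      | cons x rt ihr => simpa [addAt] using ihr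
    simp only [List.length_cons, List.replicate_succ, specSuffix]
    rw [haddAt]
    have := ih (r ++ [fA v (incRun t)])
    simp only [List.length_append, List.length_cons, List.length_nil] at this
    simpa [spec] using this

theorem altB_eq_spec (hs : List Int) : canSeePersonsCount_alt hs = spec hs := by
  unfold canSeePersonsCount_alt
  rw [mainB hs (List.replicate hs.length 0) [] 0]
  have := specSuffix_zeros hs []
  simpa [stCredits] using this

-- ===== VERDICT (by name: the statement is the Claim_ definition above) =====
theorem canSeePersonsCount_spec : Claim_equal_canSeePersonsCount := by
  intro heights _
  unfold Spec_canSeePersonsCount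
  rw [altB_eq_spec]
  exact goA_fst heights
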